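-- pv_equiv track=rewrite | github.com/SadiqueCodes/Ruju | scripts/admin_sync.py | get_juz
-- ===== SOURCE A (Python) =====
-- JUZ_STARTS = [
--     (1, 1), (2, 142), (2, 253), (3, 93), (4, 24), (4, 148), (5, 82), (6, 111), (7, 88), (8, 41),
--     (9, 93), (11, 6), (12, 53), (15, 1), (17, 1), (18, 75), (21, 1), (23, 1), (25, 21), (27, 56),
--     (29, 46), (33, 31), (36, 28), (39, 32), (41, 47), (46, 1), (51, 31), (58, 1), (67, 1), (78, 1),
-- ]
--
-- def get_juz(surah: int, ayah: int) -> int: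
--     current = 1
--     for idx, (s, a) in enumerate(JUZ_STARTS, start=1):
--         if surah > s or (surah == s and ayah >= a):
--             current = idx
--         else:
--             break
--     return current
-- ===== SOURCE B (Python) =====
-- JUZ_STARTS = [
--     (1, 1), (2, 142), (2, 253), (3, 93), (4, 24), (4, 148), (5, 82), (6, 111), (7, 88), (8, 41),
--     (9, 93), (11, 6), (12, 53), (15, 1), (17, 1), (18, 75), (21, 1), (23, 1), (25, 21), (27, 56),
--     (29, 46), (33, 31), (36, 28), (39, 32), (41, 47), (46, 1), (51, 31), (58, 1), (67, 1), (78, 1),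
-- ]
--
-- def get_juz(surah: int, ayah: int) -> int:
--     # binary search (bisect_right by hand) over the sorted start table
--     key = (surah, ayah)
--     lo, hi = 0, len(JUZ_STARTS)
--     while lo < hi:
--         mid = (lo + hi) // 2
--         if key < JUZ_STARTS[mid]:
--             hi = mid
--         else:
--             lo = mid + 1
--     return max(1, lo)
-- ===== Notes on version B (the rewrite author's own statement) =====
-- stated objective: alternative
-- what changed: Replaces the linear early-exit scan over JUZ_STARTS by a hand-written binary search (bisect_right) over the same sorted 30-entry constant table, clamped below by 1; asymptotically O(log n) vs O(n) in the table size, but the table is constant so no measurable speedup.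
import Mathlib
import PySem

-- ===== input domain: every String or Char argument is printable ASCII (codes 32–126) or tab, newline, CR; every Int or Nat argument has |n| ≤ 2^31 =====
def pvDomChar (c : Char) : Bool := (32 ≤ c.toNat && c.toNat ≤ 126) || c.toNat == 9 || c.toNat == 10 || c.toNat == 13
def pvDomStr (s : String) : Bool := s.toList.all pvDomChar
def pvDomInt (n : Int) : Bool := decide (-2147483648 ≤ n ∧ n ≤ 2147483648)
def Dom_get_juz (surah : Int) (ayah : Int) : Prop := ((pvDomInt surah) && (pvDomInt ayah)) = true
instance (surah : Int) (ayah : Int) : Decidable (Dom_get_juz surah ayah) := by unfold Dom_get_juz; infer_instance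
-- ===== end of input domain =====

-- B replaces A's linear early-exit scan with a binary search (bisect_right) over the same sorted table.

def juzStarts : List (Int × Int) :=
  [(1, 1), (2, 142), (2, 253), (3, 93), (4, 24), (4, 148), (5, 82), (6, 111), (7, 88), (8, 41),
   (9, 93), (11, 6), (12, 53), (15, 1), (17, 1), (18, 75), (21, 1), (23, 1), (25, 21), (27, 56),
   (29, 46), (33, 31), (36, 28), (39, 32), (41, 47), (46, 1), (51, 31), (58, 1), (67, 1), (78, 1)]

-- ===== PORT A =====
-- A's for-loop with break: walks the list carrying the enumerate index (start=1) and `current`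
def goA (surah ayah : Int) : List (Int × Int) → Int → Int → Int
  | [], _, cur => cur
  | (s, a) :: rest, idx, cur =>
      if surah > s ∨ (surah = s ∧ ayah ≥ a) then goA surah ayah rest (idx + 1) idx
      else cur

def get_juz (surah : Int) (ayah : Int) : Int := goA surah ayah juzStarts 1 1

-- ===== PORT B =====
-- Source B's while-loop: binary search (bisect_right); fuel bounds the iterations (32 > the ≤ 5 loop steps for hi - lo = 30)
def goB (surah ayah : Int) : Nat → Nat → Nat → Nat
  | 0, lo, _ => lo
  | fuel + 1, lo, hi =>
      if lo < hi then
        let mid := (lo + hi) / 2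
        let p := juzStarts.getD mid (0, 0)
        if surah < p.1 ∨ (surah = p.1 ∧ ayah < p.2) then goB surah ayah fuel lo mid
        else goB surah ayah fuel (mid + 1) hi
      else lo

def get_juz_alt (surah : Int) (ayah : Int) : Int :=
  max 1 ((goB surah ayah 32 0 juzStarts.length : Nat) : Int)

-- ===== PRECONDITION & SPEC =====
def Spec_get_juz (surah : Int) (ayah : Int) (out : Int) : Prop := out = get_juz_alt surah ayah
instance (surah : Int) (ayah : Int) (out : Int) : Decidable (Spec_get_juz surah ayah out) := by unfold Spec_get_juz; infer_instance

-- ===== CLAIM (what is proved, stated in full; the proofs are below) =====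
def Claim_equal_get_juz : Prop := ∀ (surah : Int) (ayah : Int), Dom_get_juz surah ayah → Spec_get_juz surah ayah (get_juz surah ayah)

-- ===== LEMMAS AND PROOFS =====

-- length of the prefix of entries ≤ key (surah, ayah): the rank both programs compute
def ff (surah ayah : Int) : List (Int × Int) → Nat
  | [] => 0
  | (s, a) :: rest => if surah > s ∨ (surah = s ∧ ayah ≥ a) then ff surah ayah rest + 1 else 0

-- "table entry i is ≤ the key"
def cnd (surah ayah : Int) (i : Nat) : Prop :=
  surah > (juzStarts.getD i (0, 0)).1 ∨
    (surah = (juzStarts.getD i (0, 0)).1 ∧ ayah ≥ (juzStarts.getD i (0, 0)).2)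

theorem ff_le_length (surah ayah : Int) (xs : List (Int × Int)) :
    ff surah ayah xs ≤ xs.length := by
  induction xs with
  | nil => simp [ff]
  | cons p rest ih =>
    obtain ⟨s, a⟩ := p
    simp only [ff, List.length_cons]
    split <;> omega

theorem ff_lt (surah ayah : Int) (xs : List (Int × Int)) :
    ∀ i, i < ff surah ayah xs →
      (surah > (xs.getD i (0, 0)).1 ∨
        (surah = (xs.getD i (0, 0)).1 ∧ ayah ≥ (xs.getD i (0, 0)).2)) := by
  induction xs with
  | nil => simp [ff]
  | cons p rest ih =>
    obtain ⟨s, a⟩ := p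
    intro i hi
    by_cases h : surah > s ∨ (surah = s ∧ ayah ≥ a)
    · cases i with
      | zero => simpa using h
      | succ j =>
        simp only [ff, if_pos h] at hi
        simpa [List.getD_cons_succ] using ih j (by omega)
    · simp only [ff, if_neg h] at hi
      omega

theorem ff_at (surah ayah : Int) (xs : List (Int × Int)) :
    ff surah ayah xs < xs.length →
      ¬ (surah > (xs.getD (ff surah ayah xs) (0, 0)).1 ∨
          (surah = (xs.getD (ff surah ayah xs) (0, 0)).1 ∧
            ayah ≥ (xs.getD (ff surah ayah xs) (0, 0)).2)) := by
  induction xs with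
  | nil => simp [ff]
  | cons p rest ih =>
    obtain ⟨s, a⟩ := p
    intro hlen
    by_cases h : surah > s ∨ (surah = s ∧ ayah ≥ a)
    · simp only [ff, if_pos h, List.length_cons] at hlen ⊢
      rw [List.getD_cons_succ]
      exact ih (by omega)
    · simp only [ff, if_neg h]
      rw [List.getD_cons_zero]
      simpa using h

-- the table is strictly increasing lexicographically
theorem juz_sorted : ∀ i, i < 30 → ∀ j, j < 30 → i < j →
    ((juzStarts.getD i (0, 0)).1 < (juzStarts.getD j (0, 0)).1 ∨
      ((juzStarts.getD i (0, 0)).1 = (juzStarts.getD j (0, 0)).1 ∧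
        (juzStarts.getD i (0, 0)).2 < (juzStarts.getD j (0, 0)).2)) := by
  decide

theorem mono (surah ayah : Int) :
    ∀ i j, i ≤ j → j < 30 → cnd surah ayah j → cnd surah ayah i := by
  intro i j hij hj hcj
  rcases Nat.eq_or_lt_of_le hij with rfl | hlt
  · exact hcj
  · have hs := juz_sorted i (by omega) j hj hlt
    unfold cnd at hcj ⊢
    omega

theorem ff_lt' (surah ayah : Int) (i : Nat) (h : i < ff surah ayah juzStarts) :
    cnd surah ayah i := by
  unfold cnd
  exact ff_lt surah ayah juzStarts i h

theorem ff_at' (surah ayah : Int) (h : ff surah ayah juzStarts < 30) :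
    ¬ cnd surah ayah (ff surah ayah juzStarts) := by
  unfold cnd
  exact ff_at surah ayah juzStarts (by simpa [juzStarts] using h)

-- a position with all entries ≤ key below it and none ≥ it above is the rank
theorem pin (surah ayah : Int) (lo : Nat) (hle : lo ≤ 30)
    (hlow : ∀ i, i < lo → cnd surah ayah i)
    (hhigh : ∀ i, lo ≤ i → i < 30 → ¬ cnd surah ayah i) :
    lo = ff surah ayah juzStarts := by
  have hN : ff surah ayah juzStarts ≤ 30 := by
    simpa [juzStarts] using ff_le_length surah ayah juzStarts
  rcases lt_trichotomy lo (ff surah ayah juzStarts) with h | h | h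
  · exact absurd (ff_lt' surah ayah lo h) (hhigh lo le_rfl (by omega))
  · exact h
  · exact absurd (hlow _ h) (ff_at' surah ayah (by omega))

theorem goB_eq (surah ayah : Int) :
    ∀ (fuel lo hi : Nat), lo ≤ hi → hi ≤ 30 → hi - lo ≤ fuel →
      (∀ i, i < lo → cnd surah ayah i) →
      (∀ i, hi ≤ i → i < 30 → ¬ cnd surah ayah i) →
      goB surah ayah fuel lo hi = ff surah ayah juzStarts := by
  intro fuel
  induction fuel with
  | zero =>
    intro lo hi hle h30 hfuel hlow hhigh
    simp only [goB]
    exact pin surah ayah lo (by omega) hlow (fun i hi' hi30 => hhigh i (by omega) hi30)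
  | succ n ih =>
    intro lo hi hle h30 hfuel hlow hhigh
    by_cases hlt : lo < hi
    · simp only [goB, if_pos hlt]
      have hmid30 : (lo + hi) / 2 < 30 := by omega
      by_cases hc : cnd surah ayah ((lo + hi) / 2)
      · rw [if_neg (by unfold cnd at hc; omega)]
        exact ih ((lo + hi) / 2 + 1) hi (by omega) h30 (by omega)
          (fun i hi' => by
            rcases Nat.lt_or_ge i lo with h | h
            · exact hlow i h
            · exact mono surah ayah i ((lo + hi) / 2) (by omega) hmid30 hc)
          hhigh
      · rw [if_pos (by unfold cnd at hc; omega)]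
        exact ih lo ((lo + hi) / 2) (by omega) (by omega) (by omega) hlow
          (fun i hi' hi30 hci => hc (mono surah ayah ((lo + hi) / 2) i hi' hi30 hci))
    · simp only [goB, if_neg hlt]
      exact pin surah ayah lo (by omega) hlow (fun i hi' hi30 => hhigh i (by omega) hi30)

theorem goA_eq (surah ayah : Int) :
    ∀ (xs : List (Int × Int)) (idx : Int),
      goA surah ayah xs idx (idx - 1) = idx - 1 + (ff surah ayah xs : Int) := by
  intro xs
  induction xs with
  | nil => intro idx; simp [goA, ff]
  | cons p rest ih =>
    obtain ⟨s, a⟩ := p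
    intro idx
    by_cases h : surah > s ∨ (surah = s ∧ ayah ≥ a)
    · have hrec := ih (idx + 1)
      have h1 : idx + 1 - 1 = idx := by ring
      rw [h1] at hrec
      simp only [goA, ff, if_pos h]
      push_cast
      omega
    · simp [goA, ff, if_neg h]

theorem goA_cons (surah ayah : Int) (s a : Int) (rest : List (Int × Int)) :
    goA surah ayah ((s, a) :: rest) 1 1 =
      max 1 ((ff surah ayah ((s, a) :: rest) : Nat) : Int) := by
  by_cases h : surah > s ∨ (surah = s ∧ ayah ≥ a)
  · have hrec := goA_eq surah ayah rest 2
    norm_num at hrec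
    simp only [goA, ff, if_pos h]
    push_cast
    omega
  · simp [goA, ff, if_neg h]

theorem get_juz_eq_rank (surah ayah : Int) :
    get_juz surah ayah = max 1 ((ff surah ayah juzStarts : Nat) : Int) := by
  unfold get_juz
  exact goA_cons surah ayah 1 1 _

theorem get_juz_alt_eq_rank (surah ayah : Int) :
    get_juz_alt surah ayah = max 1 ((ff surah ayah juzStarts : Nat) : Int) := by
  unfold get_juz_alt
  rw [goB_eq surah ayah 32 0 juzStarts.length (by simp) (by simp [juzStarts]) (by simp [juzStarts])
    (fun i hi => by omega) (fun i hi hi30 => by simp [juzStarts] at hi; omega)]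

-- ===== VERDICT (by name: the statement is the Claim_ definition above) =====
theorem get_juz_spec : Claim_equal_get_juz := by
  intro surah ayah _
  unfold Spec_get_juz
  rw [get_juz_eq_rank, get_juz_alt_eq_rank]
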